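-- pv_equiv track=rewrite | github.com/wang264/JiuZhangLintcode | AlgorithmAdvance/L5/optional/396_coins-in-a-line-iii.py | firstWillWin
-- ===== SOURCE A (Python) =====
-- def firstWillWin(values):
--     n = len(values)
--     dp = [[0 for _ in range(n)] for _ in range(n)]
--     for i in range(n):  # 初始化
--         dp[i][i] = values[i]
--     for length in range(1, n):
--         for i in range(n - length):
--             # 如果先手取i，那么dp[i][j] = values[i]-dp[i+length][j]，因为values[i+length]~values[j]是后手赢先手的分数，
--             # 所以此时先手选择values[i]和它做差
--             # 如果先手取j=i+length，那么dp[i][j] = values[j]-dp[i][j-length]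
--             dp[i][i + length] = max(values[i] - dp[i + 1][i + length], values[i + length] - dp[i][i + length - 1])
--     # 判断差值是否大于零便能知道赢了输了
--     return dp[0][n - 1] > 0
-- ===== SOURCE B (Python) =====
-- def firstWillWin(values):
--     n = len(values)
--     memo = {}
--
--     def solve(i, j):
--         # optimal (current player - other player) score difference over values[i..j]
--         if i == j:
--             return values[i]
--         if (i, j) in memo:
--             return memo[(i, j)]
--         res = max(values[i] - solve(i + 1, j), values[j] - solve(i, j - 1))
--         memo[(i, j)] = res
--         return res
--
--     return solve(0, n - 1) > 0
-- ===== Notes on version B (the rewrite author's own statement) =====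
-- stated objective: alternative
-- what changed: Replaces the bottom-up n-by-n interval DP table (loop over lengths then left endpoints) with a top-down memoized recursion solve(i,j) = max(values[i]-solve(i+1,j), values[j]-solve(i,j-1)).
-- outside the precondition, e.g. on firstWillWin([]): A raises IndexError, B raises IndexError
import Mathlib
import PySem

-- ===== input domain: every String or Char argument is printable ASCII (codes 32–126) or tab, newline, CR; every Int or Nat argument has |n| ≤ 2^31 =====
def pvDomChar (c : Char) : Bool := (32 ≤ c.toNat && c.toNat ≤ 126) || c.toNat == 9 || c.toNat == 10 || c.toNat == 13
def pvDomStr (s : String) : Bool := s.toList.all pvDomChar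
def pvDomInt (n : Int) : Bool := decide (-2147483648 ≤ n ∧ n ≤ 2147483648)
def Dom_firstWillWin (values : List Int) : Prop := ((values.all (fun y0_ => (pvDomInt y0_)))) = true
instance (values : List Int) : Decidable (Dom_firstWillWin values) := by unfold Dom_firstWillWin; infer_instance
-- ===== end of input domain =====

-- B replaces A's bottom-up n×n interval-DP table with a top-down recursion
-- solve(i,j) = max(values[i]-solve(i+1,j), values[j]-solve(i,j-1)) (memoized in Python);
-- same asymptotic cost, different decomposition. Equivalence is about the return value.

-- ===== PORT A =====
-- A's mutable n×n table dp is rendered as a pointwise-updated function Nat → Nat → Int;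
-- all indices A reads/writes are in range (loop bounds), so List.getD matches values[i].
def firstWillWin (values : List Int) : Bool :=
  let n := values.length
  -- dp = [[0]*n]*n
  let dp0 : Nat → Nat → Int := fun _ _ => 0
  -- for i in range(n): dp[i][i] = values[i]
  let dp1 : Nat → Nat → Int :=
    (List.range n).foldl
      (fun dp i => fun a b => if a = i ∧ b = i then values.getD i 0 else dp a b) dp0
  -- for length in range(1, n): for i in range(n - length): dp[i][i+length] = max(...)
  let dp2 : Nat → Nat → Int :=
    (List.range' 1 (n - 1)).foldl
      (fun dp length =>
        (List.range (n - length)).foldl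
          (fun dp i => fun a b =>
            if a = i ∧ b = i + length then
              max (values.getD i 0 - dp (i+1) (i+length))
                  (values.getD (i+length) 0 - dp i (i+length-1))
            else dp a b)
          dp)
      dp1
  decide (dp2 0 (n - 1) > 0)

-- ===== PORT B =====
-- the Python memo dict is a pure caching device; the recursion itself is ported
-- (the `i < j` test only makes the recursion total in Lean; on every reachable
-- call either i = j or i < j, exactly as in the Python).
def solveB (values : List Int) (i j : Nat) : Int :=
  if i = j then values.getD i 0
  else if _h : i < j then
    max (values.getD i 0 - solveB values (i+1) j)
        (values.getD j 0 - solveB values i (j-1))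
  else 0
termination_by j - i
decreasing_by all_goals omega

def firstWillWin_alt (values : List Int) : Bool :=
  decide (solveB values 0 (values.length - 1) > 0)

-- ===== PRECONDITION & SPEC =====
-- A raises IndexError on [] (dp[0][n-1] on an empty table); B's recursion raises there too.
def Pre_firstWillWin (values : List Int) : Prop := values ≠ []
instance (values : List Int) : Decidable (Pre_firstWillWin values) := by unfold Pre_firstWillWin; infer_instance
def pvWitness_firstWillWin : List Int := [1, 2, 2]

def Spec_firstWillWin (values : List Int) (out : Bool) : Prop := out = firstWillWin_alt values
instance (values : List Int) (out : Bool) : Decidable (Spec_firstWillWin values out) := by unfold Spec_firstWillWin; infer_instance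

-- ===== CLAIM (what is proved, stated in full; the proofs are below) =====
def Claim_equal_firstWillWin : Prop := ∀ (values : List Int), Dom_firstWillWin values → Pre_firstWillWin values → Spec_firstWillWin values (firstWillWin values)

-- ===== LEMMAS AND PROOFS =====

-- the diagonal-initialisation fold, characterised pointwise
theorem pv_init_char (values : List Int) (l : List Nat) (dp : Nat → Nat → Int) (a b : Nat) :
    (l.foldl (fun dp i => fun a b => if a = i ∧ b = i then values.getD i 0 else dp a b) dp) a b
      = if a = b ∧ a ∈ l then values.getD a 0 else dp a b := by
  induction l generalizing dp with
  | nil => simp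
  | cons x t ih =>
      simp only [List.foldl_cons, ih, List.mem_cons]
      by_cases hab : a = b
      · subst hab
        by_cases hx : a = x <;> by_cases ht : a ∈ t <;> simp [hx, ht]
      · simp only [hab, false_and, if_false]
        by_cases hx : a = x ∧ b = x
        · exact absurd (hx.1.trans hx.2.symm) hab
        · simp only [ite_eq_right_iff, and_imp]
          intro h1 h2
          exact absurd (h1.trans h2.symm) hab

-- inner loop (fixed length L): processing i = s, s+1, … preserves the "all shorter
-- intervals are solveB" invariant and establishes it for intervals of length L
theorem pv_inner (values : List Int) (n L : Nat) (hn : n = values.length) (hL : 1 ≤ L)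
    (k s : Nat) (hk : s + k + L ≤ n) (dp : Nat → Nat → Int)
    (hshort : ∀ a b, b < n → a ≤ b → b - a < L → dp a b = solveB values a b)
    (hdone : ∀ i, i < s → dp i (i + L) = solveB values i (i + L)) :
    (∀ a b, b < n → a ≤ b → b - a < L →
        ((List.range' s k).foldl
          (fun dp i => fun a b =>
            if a = i ∧ b = i + L then
              max (values.getD i 0 - dp (i+1) (i+L))
                  (values.getD (i+L) 0 - dp i (i+L-1))
            else dp a b) dp) a b = solveB values a b)
    ∧ (∀ i, i < s + k →
        ((List.range' s k).foldl
          (fun dp i => fun a b =>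
            if a = i ∧ b = i + L then
              max (values.getD i 0 - dp (i+1) (i+L))
                  (values.getD (i+L) 0 - dp i (i+L-1))
            else dp a b) dp) i (i + L) = solveB values i (i + L)) := by
  induction k generalizing s dp with
  | zero => exact ⟨fun a b hb hab hr => hshort a b hb hab hr, fun i hi => hdone i hi⟩
  | succ k ih =>
      simp only [List.range'_succ, List.foldl_cons]
      -- the table after the update at (s, s+L)
      have hupd : ∀ a b,
          (fun a b =>
            if a = s ∧ b = s + L then
              max (values.getD s 0 - dp (s+1) (s+L))
                  (values.getD (s+L) 0 - dp s (s+L-1))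
            else dp a b) a b
          = if a = s ∧ b = s + L then solveB values s (s + L) else dp a b := by
        intro a b
        by_cases h : a = s ∧ b = s + L
        · simp only [h]
          have h1 : dp (s+1) (s+L) = solveB values (s+1) (s+L) :=
            hshort _ _ (by omega) (by omega) (by omega)
          have h2 : dp s (s+L-1) = solveB values s (s+L-1) :=
            hshort _ _ (by omega) (by omega) (by omega)
          rw [h1, h2]
          rw [show solveB values s (s + L)
              = max (values.getD s 0 - solveB values (s+1) (s+L))
                    (values.getD (s+L) 0 - solveB values s (s+L-1)) by
            rw [solveB]
            have hne : ¬ s = s + L := by omega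
            have hlt : s < s + L := by omega
            rw [if_neg hne, dif_pos hlt]]
        · simp [h]
      have hshort' : ∀ a b, b < n → a ≤ b → b - a < L →
          (fun a b =>
            if a = s ∧ b = s + L then
              max (values.getD s 0 - dp (s+1) (s+L))
                  (values.getD (s+L) 0 - dp s (s+L-1))
            else dp a b) a b = solveB values a b := by
        intro a b hb hab hr
        rw [hupd]
        have : ¬ (a = s ∧ b = s + L) := by omega
        rw [if_neg this]; exact hshort a b hb hab hr
      have hdone' : ∀ i, i < s + 1 →
          (fun a b =>
            if a = s ∧ b = s + L then
              max (values.getD s 0 - dp (s+1) (s+L))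
                  (values.getD (s+L) 0 - dp s (s+L-1))
            else dp a b) i (i + L) = solveB values i (i + L) := by
        intro i hi
        rw [hupd]
        by_cases h : i = s
        · subst h; simp
        · have : ¬ (i = s ∧ i + L = s + L) := by omega
          rw [if_neg this]; exact hdone i (by omega)
      have := ih (s + 1) (by omega) _ hshort' hdone'
      exact ⟨this.1, fun i hi => this.2 i (by omega)⟩

-- outer loop over lengths s, s+1, …, carrying "all intervals of gap < s are solveB"
theorem pv_outer (values : List Int) (n : Nat) (hn : n = values.length)
    (k s : Nat) (hs : 1 ≤ s) (hk : s + k ≤ n) (dp : Nat → Nat → Int)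
    (hinv : ∀ a b, b < n → a ≤ b → b - a < s → dp a b = solveB values a b) :
    ∀ a b, b < n → a ≤ b → b - a < s + k →
      ((List.range' s k).foldl
        (fun dp length =>
          (List.range (n - length)).foldl
            (fun dp i => fun a b =>
              if a = i ∧ b = i + length then
                max (values.getD i 0 - dp (i+1) (i+length))
                    (values.getD (i+length) 0 - dp i (i+length-1))
              else dp a b)
            dp)
        dp) a b = solveB values a b := by
  induction k generalizing s dp with
  | zero => intro a b hb hab hr; simpa using hinv a b hb hab hr
  | succ k ih =>
      simp only [List.range'_succ, List.foldl_cons]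
      have hin := pv_inner values n s hn hs (n - s) 0 (by omega) dp
        (fun a b hb hab hr => hinv a b hb hab hr)
        (fun i hi => by omega)
      rw [← List.range_eq_range'] at hin
      have hinv' : ∀ a b, b < n → a ≤ b → b - a < s + 1 →
          ((List.range (n - s)).foldl
            (fun dp i => fun a b =>
              if a = i ∧ b = i + s then
                max (values.getD i 0 - dp (i+1) (i+s))
                    (values.getD (i+s) 0 - dp i (i+s-1))
              else dp a b) dp) a b = solveB values a b := by
        intro a b hb hab hr
        by_cases h : b - a < s
        · exact hin.1 a b hb hab h
        · have hba : b = a + s := by omega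
          subst hba
          exact hin.2 a (by omega)
      intro a b hb hab hr
      exact ih (s + 1) (by omega) (by omega) _ hinv' a b hb hab (by omega)

-- ===== VERDICT (by name: the statement is the Claim_ definition above) =====
theorem firstWillWin_spec : Claim_equal_firstWillWin := by
  intro values _ hpre
  unfold Spec_firstWillWin firstWillWin firstWillWin_alt
  have hn : 1 ≤ values.length := by
    cases values with
    | nil => exact absurd rfl hpre
    | cons x t => simp
  -- base invariant after the diagonal initialisation
  have hinv : ∀ a b, b < values.length → a ≤ b → b - a < 1 →
      ((List.range values.length).foldl
        (fun dp i => fun a b => if a = i ∧ b = i then values.getD i 0 else dp a b)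
        (fun _ _ => (0 : Int))) a b = solveB values a b := by
    intro a b hb hab hr
    have hba : a = b := by omega
    subst hba
    rw [pv_init_char]
    have hmem : a = a ∧ a ∈ List.range values.length := ⟨rfl, List.mem_range.mpr (by omega)⟩
    rw [if_pos hmem, solveB]
    simp
  have := pv_outer values values.length rfl (values.length - 1) 1 (by omega) (by omega) _ hinv
    0 (values.length - 1) (by omega) (by omega) (by omega)
  simp only [this]
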